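-- pv_equiv track=rewrite | github.com/MeetSpeakLearn/ExamplesCreatedForTutoring | Python/multiplication.py | gradeSchoolAddition
-- ===== SOURCE A (Python) =====
-- def bung(anyObj, anyList: list) -> list:
--     result = [anyObj]
--     result.extend(anyList)
--     return result
--
-- def gradeSchoolAddition(addends: list, carry: int = 0) -> list:
--     digitSum = carry                                                    # Initialize the multiply of digits to whatever is carried
--     reducedAddends = []                                                 # We will recurse over the rest of the addends
--     for addend in addends:
--         if (len(addend) == 0):                                          # All addends are of the same length. If we encounter an empty addend, we've finished recursing.
--             if (carry == 0):                                            # If carry is zero, there is nothing more to add to the result, if it is not zero, add the carry.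
--                 return []
--             else:
--                 return [carry]
--         thisDigit, *reducedAddend = addend                              # Destructure the addend.
--         digitSum += thisDigit                                           # Add the first digit of the addend into digitSum
--         reducedAddends.append(reducedAddend)                            # Add the reduced addend to the list of addends over which we'll recurse
--     carry = digitSum // 10                                              # Set carry to the carry value of the next level of recursion
--     digit = digitSum % 10                                               # Compute the digit for this partial result
--     return bung(digit, gradeSchoolAddition(reducedAddends, carry))      # Return a new list, the head of which is the digit and the tail of which is the solution to the reduced addends.
-- ===== SOURCE B (Python) =====
-- def gradeSchoolAddition(addends: list, carry: int = 0) -> list: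
--     # Single column-wise pass up to the shortest addend (where A's recursion stops).
--     m = min(len(a) for a in addends)
--     result = []
--     for k in range(m):
--         s = carry + sum(a[k] for a in addends)
--         carry = s // 10
--         result.append(s % 10)
--     if carry != 0:
--         result.append(carry)
--     return result
-- ===== Notes on version B (the rewrite author's own statement) =====
-- stated objective: faster
-- what changed: Replaced A's per-level recursion that rebuilds the whole list of reduced addends (copying every tail at every level) by one column-wise pass over digit indices up to the shortest addend, with a running carry and no list copying.
-- outside the precondition, e.g. on gradeSchoolAddition([], 0): A raises RecursionError, B raises ValueError
import Mathlib
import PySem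

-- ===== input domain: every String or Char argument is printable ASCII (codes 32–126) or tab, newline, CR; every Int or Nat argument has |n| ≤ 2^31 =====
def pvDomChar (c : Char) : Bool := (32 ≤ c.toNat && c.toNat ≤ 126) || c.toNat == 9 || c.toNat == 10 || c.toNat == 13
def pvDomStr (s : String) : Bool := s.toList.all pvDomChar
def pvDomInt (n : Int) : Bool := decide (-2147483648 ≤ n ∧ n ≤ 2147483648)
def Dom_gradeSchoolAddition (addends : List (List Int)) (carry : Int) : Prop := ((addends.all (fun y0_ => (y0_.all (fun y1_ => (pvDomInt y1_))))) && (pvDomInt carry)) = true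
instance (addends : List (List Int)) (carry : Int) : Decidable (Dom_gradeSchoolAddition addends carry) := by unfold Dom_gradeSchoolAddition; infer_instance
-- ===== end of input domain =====

-- B replaces A's recursion (which copies every reduced addend at every level) by one
-- column-wise indexed pass with a running carry; a timing run measured it faster.
-- Pre_ excludes the empty addends list, on which A recurses forever (RecursionError)
-- and B's min() raises ValueError.


-- ===== PORT A =====
-- the for-loop of A: scans the addends, accumulating digitSum and the reduced addends
-- (in reverse; reversed on exit), returning early (.inl) when an empty addend is met.
def gsaLoop (carry : Int) : List (List Int) → Int → List (List Int) → Sum (List Int) (Int × List (List Int))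
  | [], digitSum, acc => .inr (digitSum, acc.reverse)
  | [] :: _, _, _ => .inl (if carry = 0 then [] else [carry])
  | (d :: rest) :: more, digitSum, acc => gsaLoop carry more (digitSum + d) (rest :: acc)

-- A's recursion, driven by fuel (sum of lengths + 1, enough whenever addends ≠ [],
-- which Pre_ guarantees; Python A does not terminate on []).
def gsaRec : Nat → List (List Int) → Int → List Int
  | 0, _, _ => []
  | fuel + 1, addends, carry =>
    match gsaLoop carry addends carry [] with
    | .inl r => r
    | .inr (digitSum, reduced) =>
        PySem.Int.mod digitSum 10 :: gsaRec fuel reduced (PySem.Int.floordiv digitSum 10)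

def gradeSchoolAddition (addends : List (List Int)) (carry : Int) : List Int :=
  gsaRec ((addends.map List.length).sum + 1) addends carry

-- ===== PORT B =====
def gradeSchoolAddition_alt (addends : List (List Int)) (carry : Int) : List Int :=
  let m := ((addends.map List.length).min?).getD 0   -- min(len(a) for a in addends); Pre_ rules out the empty list
  let st := (List.range m).foldl
      (fun (st : List Int × Int) k =>
        let s := st.2 + addends.foldl (fun acc a => acc + a.getD k 0) 0
        (st.1 ++ [PySem.Int.mod s 10], PySem.Int.floordiv s 10)) ([], carry)
  if st.2 = 0 then st.1 else st.1 ++ [st.2]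

-- ===== PRECONDITION & SPEC =====
-- Pre_ excludes only addends = [], where Python A recurses forever (RecursionError)
-- and Python B raises ValueError (min of an empty sequence).
def Pre_gradeSchoolAddition (addends : List (List Int)) (carry : Int) : Prop := addends ≠ []
instance (addends : List (List Int)) (carry : Int) : Decidable (Pre_gradeSchoolAddition addends carry) := by unfold Pre_gradeSchoolAddition; infer_instance
def pvWitness_gradeSchoolAddition : List (List Int) × Int := ([[9, 1], [3, 2]], 0)

def Spec_gradeSchoolAddition (addends : List (List Int)) (carry : Int) (out : List Int) : Prop := out = gradeSchoolAddition_alt addends carry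
instance (addends : List (List Int)) (carry : Int) (out : List Int) : Decidable (Spec_gradeSchoolAddition addends carry out) := by unfold Spec_gradeSchoolAddition; infer_instance

-- ===== CLAIM (what is proved, stated in full; the proofs are below) =====
def Claim_equal_gradeSchoolAddition : Prop := ∀ (addends : List (List Int)) (carry : Int), Dom_gradeSchoolAddition addends carry → Pre_gradeSchoolAddition addends carry → Spec_gradeSchoolAddition addends carry (gradeSchoolAddition addends carry)

-- ===== LEMMAS AND PROOFS =====

-- A's loop when every addend is nonempty: accumulate head digits, collect tails.
theorem gsaLoop_inr (carry : Int) :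
    ∀ (l : List (List Int)) (ds : Int) (acc : List (List Int)),
      (∀ a ∈ l, a ≠ []) →
      gsaLoop carry l ds acc
        = .inr (ds + (l.map (fun a => a.headD 0)).sum, acc.reverse ++ l.map List.tail) := by
  intro l
  induction l with
  | nil => intro ds acc _; simp [gsaLoop]
  | cons a t ih =>
    intro ds acc h
    match a with
    | [] => exact absurd rfl (h [] (by simp))
    | d :: rest =>
      rw [show gsaLoop carry ((d :: rest) :: t) ds acc = gsaLoop carry t (ds + d) (rest :: acc) from rfl,
          ih (ds + d) (rest :: acc) (fun a ha => h a (by simp [ha]))]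
      simp [add_assoc]

-- A's loop when some addend is empty: early return, digitSum discarded.
theorem gsaLoop_inl (carry : Int) :
    ∀ (l : List (List Int)) (ds : Int) (acc : List (List Int)),
      (∃ a ∈ l, a = []) →
      gsaLoop carry l ds acc = .inl (if carry = 0 then [] else [carry]) := by
  intro l
  induction l with
  | nil => intro ds acc h; simp at h
  | cons a t ih =>
    intro ds acc h
    match a with
    | [] => simp [gsaLoop]
    | d :: rest =>
      have h' : ∃ a ∈ t, a = [] := by
        rcases h with ⟨b, hb, hbe⟩
        rcases List.mem_cons.mp hb with h1 | h1
        · exact absurd (h1 ▸ hbe) (by simp)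
        · exact ⟨b, h1, hbe⟩
      rw [show gsaLoop carry ((d :: rest) :: t) ds acc = gsaLoop carry t (ds + d) (rest :: acc) from rfl]
      exact ih (ds + d) (rest :: acc) h'

-- B's loop state: the accumulated digit list is a prefix that can be factored out.
theorem foldl_app_shape (f g : Int → Nat → Int) :
    ∀ (ks : List Nat) (acc : List Int) (c : Int),
      ks.foldl (fun (st : List Int × Int) k => (st.1 ++ [f st.2 k], g st.2 k)) (acc, c)
        = (acc ++ (ks.foldl (fun (st : List Int × Int) k => (st.1 ++ [f st.2 k], g st.2 k)) ([], c)).1,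
           (ks.foldl (fun (st : List Int × Int) k => (st.1 ++ [f st.2 k], g st.2 k)) ([], c)).2) := by
  intro ks
  induction ks with
  | nil => intro acc c; simp
  | cons k t ih =>
    intro acc c
    simp only [List.foldl_cons]
    rw [ih (acc ++ [f c k]), ih ([] ++ [f c k])]
    simp

-- running min of a Nat list is below its seed and every element
theorem foldl_min_le : ∀ (t : List Nat) (x : Nat),
    t.foldl min x ≤ x ∧ ∀ y ∈ t, t.foldl min x ≤ y := by
  intro t
  induction t with
  | nil => intro x; simp
  | cons z t ih =>
    intro x
    simp only [List.foldl_cons]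
    obtain ⟨h1, h2⟩ := ih (min x z)
    refine ⟨le_trans h1 (by omega), ?_⟩
    intro y hy
    rcases List.mem_cons.mp hy with rfl | hy
    · exact le_trans h1 (by omega)
    · exact h2 y hy

-- min over a Nat list commutes with subtracting one.
theorem foldl_min_pred : ∀ (xs : List Nat) (x : Nat),
    (xs.map (fun n => n - 1)).foldl min (x - 1) = xs.foldl min x - 1 := by
  intro xs
  induction xs with
  | nil => intro x; simp
  | cons y t ih =>
    intro x
    simp only [List.map_cons, List.foldl_cons]
    rw [show min (x - 1) (y - 1) = min x y - 1 by omega, ih]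

theorem tail_lengths (l : List (List Int)) :
    (l.map List.tail).map List.length = (l.map List.length).map (fun n => n - 1) := by
  simp only [List.map_map]
  exact List.map_congr_left (fun a _ => by simp [List.length_tail])

theorem min_tails (l : List (List Int)) (hne : l ≠ []) :
    (((l.map List.tail).map List.length).min?).getD 0
      = ((l.map List.length).min?).getD 0 - 1 := by
  match l with
  | [] => exact absurd rfl hne
  | a :: t =>
    rw [tail_lengths]
    simp only [List.map_cons, List.min?_cons', Option.getD_some]
    exact foldl_min_pred (t.map List.length) a.length

-- every element of a Nat list is at most its sum
theorem mem_le_sum : ∀ (ns : List Nat) (a : Nat), a ∈ ns → a ≤ ns.sum := by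
  intro ns
  induction ns with
  | nil => intro a h; simp at h
  | cons x t ih =>
    intro a h
    rcases List.mem_cons.mp h with rfl | h
    · simp
    · have := ih a h; simp only [List.sum_cons]; omega

theorem min_le_sum (l : List (List Int)) (hne : l ≠ []) :
    ((l.map List.length).min?).getD 0 ≤ (l.map List.length).sum := by
  match l with
  | [] => exact absurd rfl hne
  | a :: t =>
    simp only [List.map_cons, List.min?_cons', Option.getD_some]
    exact le_trans ((foldl_min_le (t.map List.length) a.length).1)
      (mem_le_sum _ _ (by simp))

theorem all_ne_nil_of_min_pos (l : List (List Int))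
    (h : 0 < ((l.map List.length).min?).getD 0) : ∀ a ∈ l, a ≠ [] := by
  intro a ha hnil
  subst hnil
  match l, ha, h with
  | b :: t, hb, h =>
    rw [List.map_cons, List.min?_cons', Option.getD_some] at h
    have h1 := (foldl_min_le (t.map List.length) b.length).1
    have h2 := (foldl_min_le (t.map List.length) b.length).2
    rcases List.mem_cons.mp hb with heq | hm
    · rw [← heq] at h h1
      simp at h h1
      omega
    · have h3 := h2 (List.length ([] : List Int)) (List.mem_map_of_mem hm)
      simp at h3
      omega

theorem exists_nil_of_min_zero (l : List (List Int)) (hne : l ≠ [])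
    (h : ((l.map List.length).min?).getD 0 = 0) : ∃ a ∈ l, a = [] := by
  have hm : (l.map List.length).min? = some 0 := by
    cases hmin : (l.map List.length).min? with
    | none => simp_all [List.min?_eq_none_iff]
    | some v => simp_all
  have := List.min?_mem hm
  rcases List.mem_map.mp this with ⟨a, ha, hlen⟩
  exact ⟨a, ha, List.eq_nil_of_length_eq_zero hlen⟩

theorem getD_zero_headD (a : List Int) : a.getD 0 0 = a.headD 0 := by
  cases a <;> rfl

theorem getD_succ_tail (a : List Int) (k : Nat) : a.getD (k + 1) 0 = a.tail.getD k 0 := by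
  cases a <;> simp [List.getD]

-- one level of B equals head digit plus B on the tails
theorem alt_step (addends : List (List Int)) (carry : Int) (n : Nat)
    (hne : addends ≠ [])
    (hmin : ((addends.map List.length).min?).getD 0 = n + 1) :
    gradeSchoolAddition_alt addends carry
      = PySem.Int.mod (carry + (addends.map (fun a => a.headD 0)).sum) 10
          :: gradeSchoolAddition_alt (addends.map List.tail)
               (PySem.Int.floordiv (carry + (addends.map (fun a => a.headD 0)).sum) 10) := by
  have htmin : (((addends.map List.tail).map List.length).min?).getD 0 = n := by
    rw [min_tails addends hne, hmin]; omega
  unfold gradeSchoolAddition_alt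
  rw [hmin, htmin]
  simp only [List.range_succ_eq_map, List.foldl_cons, List.nil_append]
  -- first iteration (k = 0)
  have hcol0 : addends.foldl (fun acc a => acc + a.getD 0 0) 0
      = (addends.map (fun a => a.headD 0)).sum := by
    rw [PySem.List.foldl_add addends (fun a => a.getD 0 0) 0]
    simp only [zero_add]
    exact congrArg List.sum (List.map_congr_left (fun a _ => getD_zero_headD a))
  rw [hcol0]
  -- the remaining iterations over k+1 on addends are the iterations over k on the tails
  have hstep : (fun (st : List Int × Int) (k : Nat) =>
        (st.1 ++ [PySem.Int.mod (st.2 + addends.foldl (fun acc a => acc + a.getD (Nat.succ k) 0) 0) 10],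
         PySem.Int.floordiv (st.2 + addends.foldl (fun acc a => acc + a.getD (Nat.succ k) 0) 0) 10))
      = (fun (st : List Int × Int) (k : Nat) =>
        (st.1 ++ [PySem.Int.mod (st.2 + (addends.map List.tail).foldl (fun acc a => acc + a.getD k 0) 0) 10],
         PySem.Int.floordiv (st.2 + (addends.map List.tail).foldl (fun acc a => acc + a.getD k 0) 0) 10)) := by
    funext st k
    rw [List.foldl_map]
    simp only [getD_succ_tail]
  rw [List.foldl_map, hstep]
  set c0 := PySem.Int.floordiv (carry + (addends.map (fun a => a.headD 0)).sum) 10 with hc0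
  set d0 := PySem.Int.mod (carry + (addends.map (fun a => a.headD 0)).sum) 10 with hd0
  rw [foldl_app_shape
        (fun c k => PySem.Int.mod (c + (addends.map List.tail).foldl (fun acc a => acc + a.getD k 0) 0) 10)
        (fun c k => PySem.Int.floordiv (c + (addends.map List.tail).foldl (fun acc a => acc + a.getD k 0) 0) 10)
        (List.range n) [d0] c0]
  split <;> simp

theorem main_lemma : ∀ (m : Nat) (addends : List (List Int)) (carry : Int) (fuel : Nat),
    addends ≠ [] →
    ((addends.map List.length).min?).getD 0 = m →
    m + 1 ≤ fuel →
    gsaRec fuel addends carry = gradeSchoolAddition_alt addends carry := by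
  intro m
  induction m with
  | zero =>
    intro addends carry fuel hne hmin hf
    obtain ⟨f', rfl⟩ : ∃ f', fuel = f' + 1 := ⟨fuel - 1, by omega⟩
    have hex := exists_nil_of_min_zero addends hne hmin
    unfold gsaRec
    rw [gsaLoop_inl carry addends carry [] hex]
    unfold gradeSchoolAddition_alt
    rw [hmin]
    simp only [List.range_zero, List.foldl_nil]
    split <;> simp
  | succ n ih =>
    intro addends carry fuel hne hmin hf
    obtain ⟨f', rfl⟩ : ∃ f', fuel = f' + 1 := ⟨fuel - 1, by omega⟩
    have hall : ∀ a ∈ addends, a ≠ [] := all_ne_nil_of_min_pos addends (by omega)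
    unfold gsaRec
    rw [gsaLoop_inr carry addends carry [] hall]
    simp only [List.reverse_nil, List.nil_append]
    have htne : addends.map List.tail ≠ [] := by simpa using hne
    have htmin : (((addends.map List.tail).map List.length).min?).getD 0 = n := by
      rw [min_tails addends hne, hmin]; omega
    rw [ih (addends.map List.tail) _ f' htne htmin (by omega)]
    exact (alt_step addends carry n hne hmin).symm

-- ===== VERDICT (by name: the statement is the Claim_ definition above) =====
theorem gradeSchoolAddition_spec : Claim_equal_gradeSchoolAddition := by
  intro addends carry _ hpre
  unfold Spec_gradeSchoolAddition gradeSchoolAddition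
  exact main_lemma _ addends carry _ hpre rfl (by have := min_le_sum addends hpre; omega)
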